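-- pv_equiv track=rewrite | github.com/jzhanay001/Python-Bootcamp | Assignment_2/challenge_4.py | sum_L_H_odd
-- ===== SOURCE A (Python) =====
-- def sum_L_H_odd(list):
--
--     length=len(list)
--     odd_list=[]
--
--     for i in range(0,length):
--
--         if list[i] % 2 != 0:
--
--             odd_list.append(list[i])
--
--     if len(odd_list) != 0:
--
--         min_odd=min(odd_list)
--         max_odd=max(odd_list)
--
--     else:
--
--         min_odd=0
--         max_odd=0
--
--     total_odd_sum=min_odd+max_odd
--     return total_odd_sum
-- ===== SOURCE B (Python) =====
-- def sum_L_H_odd(list):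
--     # Single pass: maintain running min/max of odd elements; no intermediate list.
--     lo = None
--     hi = None
--     for x in list:
--         if x % 2 != 0:
--             if lo is None:
--                 lo = x
--                 hi = x
--             else:
--                 if x < lo:
--                     lo = x
--                 if x > hi:
--                     hi = x
--     if lo is None:
--         return 0
--     return lo + hi
-- ===== Notes on version B (the rewrite author's own statement) =====
-- stated objective: alternative
-- what changed: Replaces A's build-an-odd_list pass followed by separate min() and max() scans with one fused traversal maintaining running lo/hi extremes and no intermediate list.
import Mathlib
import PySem

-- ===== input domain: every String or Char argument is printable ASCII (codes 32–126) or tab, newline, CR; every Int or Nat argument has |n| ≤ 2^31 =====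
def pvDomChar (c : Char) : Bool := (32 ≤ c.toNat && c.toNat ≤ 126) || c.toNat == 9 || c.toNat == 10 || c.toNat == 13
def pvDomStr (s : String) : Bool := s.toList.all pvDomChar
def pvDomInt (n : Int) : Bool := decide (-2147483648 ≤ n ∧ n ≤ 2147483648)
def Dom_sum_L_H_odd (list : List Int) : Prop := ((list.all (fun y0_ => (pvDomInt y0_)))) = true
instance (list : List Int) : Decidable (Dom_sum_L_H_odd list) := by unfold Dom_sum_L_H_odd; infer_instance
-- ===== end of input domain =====

-- B fuses A's three passes (collect the odds, min(), max()) into one traversal with running extremes.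

-- ===== PORT A =====
def sum_L_H_odd (list : List Int) : Int :=
  let length : Int := list.length
  let odd_list : List Int :=
    (PySem.List.pyRange 0 length 1).foldl
      (fun acc i =>
        if PySem.Int.mod (PySem.List.pyGetD list i 0) 2 ≠ 0 then
          acc ++ [PySem.List.pyGetD list i 0]
        else acc) []
  let min_odd : Int :=
    if odd_list.length ≠ 0 then (PySem.List.min? odd_list (fun y => y)).getD 0 else 0
  let max_odd : Int :=
    if odd_list.length ≠ 0 then (PySem.List.max? odd_list (fun y => y)).getD 0 else 0
  min_odd + max_odd

-- ===== PORT B =====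
-- the loop body of B: fold in one element, updating the running (lo, hi) pair
def pvStep (acc : Option (Int × Int)) (x : Int) : Option (Int × Int) :=
  if PySem.Int.mod x 2 ≠ 0 then
    match acc with
    | none => some (x, x)
    | some (lo, hi) => some (if x < lo then x else lo, if hi < x then x else hi)
  else acc

def sum_L_H_odd_alt (list : List Int) : Int :=
  match list.foldl pvStep (none : Option (Int × Int)) with
  | none => 0
  | some (lo, hi) => lo + hi

-- ===== PRECONDITION & SPEC =====
def Spec_sum_L_H_odd (list : List Int) (out : Int) : Prop := out = sum_L_H_odd_alt list
instance (list : List Int) (out : Int) : Decidable (Spec_sum_L_H_odd list out) := by unfold Spec_sum_L_H_odd; infer_instance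

-- ===== CLAIM (what is proved, stated in full; the proofs are below) =====
def Claim_equal_sum_L_H_odd : Prop := ∀ (list : List Int), Dom_sum_L_H_odd list → Spec_sum_L_H_odd list (sum_L_H_odd list)

-- ===== LEMMAS AND PROOFS =====

theorem pvMinIf (x lo : Int) : (if x < lo then x else lo) = min lo x := by
  rw [min_def]; split_ifs <;> omega

theorem pvMaxIf (x hi : Int) : (if hi < x then x else hi) = max hi x := by
  rw [max_def]; split_ifs <;> omega

-- B's fold state, once a pair is live, carries the running min/max of the odds still to come.
theorem pvB_fold_some (xs : List Int) (lo hi : Int) :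
    xs.foldl pvStep (some (lo, hi))
    = some ((xs.filter (fun x => decide (PySem.Int.mod x 2 ≠ 0))).foldl min lo,
            (xs.filter (fun x => decide (PySem.Int.mod x 2 ≠ 0))).foldl max hi) := by
  induction xs generalizing lo hi with
  | nil => rfl
  | cons y t ih =>
    simp only [List.foldl_cons, List.filter_cons]
    by_cases h : PySem.Int.mod y 2 ≠ 0
    · have hd : decide (PySem.Int.mod y 2 ≠ 0) = true := by simpa using h
      rw [hd, if_pos rfl,
          show pvStep (some (lo, hi)) y = some (min lo y, max hi y) from by
            simp only [pvStep, if_pos h, pvMinIf, pvMaxIf],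
          ih, List.foldl_cons, List.foldl_cons]
    · have hd : decide (PySem.Int.mod y 2 ≠ 0) = false := by simpa using h
      rw [hd, if_neg Bool.false_ne_true,
          show pvStep (some (lo, hi)) y = some (lo, hi) from by
            simp only [pvStep, if_neg h],
          ih]

-- B's fold from the initial 'no odd seen yet' state, characterised by the filtered list.
theorem pvB_fold_none (xs : List Int) :
    xs.foldl pvStep (none : Option (Int × Int))
    = match xs.filter (fun x => decide (PySem.Int.mod x 2 ≠ 0)) with
      | [] => none
      | m :: t => some (t.foldl min m, t.foldl max m) := by
  induction xs with
  | nil => rfl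
  | cons y t ih =>
    simp only [List.foldl_cons, List.filter_cons]
    by_cases h : PySem.Int.mod y 2 ≠ 0
    · have hd : decide (PySem.Int.mod y 2 ≠ 0) = true := by simpa using h
      rw [hd, if_pos rfl,
          show pvStep none y = some (y, y) from by simp only [pvStep, if_pos h],
          pvB_fold_some]
    · have hd : decide (PySem.Int.mod y 2 ≠ 0) = false := by simpa using h
      rw [hd, if_neg Bool.false_ne_true,
          show pvStep none y = none from by simp only [pvStep, if_neg h],
          ih]

-- A's odd_list loop builds exactly the filter of the input by oddness.
theorem pvA_odd_list (list : List Int) :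
    (PySem.List.pyRange 0 (list.length : Int) 1).foldl
      (fun acc i =>
        if PySem.Int.mod (PySem.List.pyGetD list i 0) 2 ≠ 0 then
          acc ++ [PySem.List.pyGetD list i 0]
        else acc) []
    = list.filter (fun x => decide (PySem.Int.mod x 2 ≠ 0)) := by
  rw [PySem.List.foldl_pyRange_zero_pyGetD' list 0
        (fun acc x => if PySem.Int.mod x 2 ≠ 0 then acc ++ [x] else acc) []]
  have h := PySem.List.foldl_append_if (fun x => decide (PySem.Int.mod x 2 ≠ 0))
    (fun x : Int => x) list []
  simpa using h

-- ===== VERDICT (by name: the statement is the Claim_ definition above) =====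
theorem sum_L_H_odd_spec : Claim_equal_sum_L_H_odd := by
  intro list _
  unfold Spec_sum_L_H_odd
  simp only [sum_L_H_odd, sum_L_H_odd_alt]
  rw [pvA_odd_list, pvB_fold_none]
  cases hf : list.filter (fun x => decide (PySem.Int.mod x 2 ≠ 0)) with
  | nil => simp
  | cons m t =>
    simp [PySem.List.min?_id_cons, PySem.List.max?_id_cons]
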